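-- pv_equiv track=rewrite | github.com/MalikAza/aoc-24 | day_1/python/main.py | pair_min_left_with_min_right
-- ===== SOURCE A (Python) =====
-- from typing import List, Tuple
--
-- def pair_min_left_with_min_right(left: List[int], right: List[int]) -> List[Tuple[int, int]]:
--     paired = []
--     while len(left) > 0 and len(right) > 0:
--         min_left = min(left)
--         left.remove(min_left)
--
--         min_right = min(right)
--         right.remove(min_right)
--
--         paired.append((min_left, min_right))
--
--     return paired
-- ===== SOURCE B (Python) =====
-- from typing import List, Tuple
--
-- def pair_min_left_with_min_right(left: List[int], right: List[int]) -> List[Tuple[int, int]]: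
--     # Sort both lists once and zip them together (zip stops at the shorter one).
--     # Unlike A, this does not mutate the caller's lists.
--     return list(zip(sorted(left), sorted(right)))
-- ===== Notes on version B (the rewrite author's own statement) =====
-- stated objective: faster
-- what changed: Replaces the repeated min()+remove() selection loop with a single sort of each list followed by zip, which truncates at the shorter list.
import Mathlib
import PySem

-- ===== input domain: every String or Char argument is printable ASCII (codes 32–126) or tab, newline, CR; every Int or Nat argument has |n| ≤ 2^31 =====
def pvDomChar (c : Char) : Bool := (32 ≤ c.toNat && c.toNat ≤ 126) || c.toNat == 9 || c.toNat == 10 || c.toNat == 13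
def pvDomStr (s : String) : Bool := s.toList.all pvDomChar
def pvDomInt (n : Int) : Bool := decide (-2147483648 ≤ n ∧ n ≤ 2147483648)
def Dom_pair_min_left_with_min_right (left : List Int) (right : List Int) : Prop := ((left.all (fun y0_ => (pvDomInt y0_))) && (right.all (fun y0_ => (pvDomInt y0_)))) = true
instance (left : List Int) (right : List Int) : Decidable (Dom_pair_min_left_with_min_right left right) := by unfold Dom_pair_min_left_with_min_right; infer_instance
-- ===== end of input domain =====

-- B sorts both lists once and zips them instead of A's repeated min()+remove() selection loop;
-- equivalence is about the RETURN value only: Python A mutates its argument lists in place, B does not.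

-- ===== PORT A =====
-- while loop of A: fuel = number of iterations the loop performs (one element is removed
-- from each list per iteration, so min of the lengths); state is (left, right, paired).
def pvPairGo : Nat → List Int → List Int → List (Int × Int) → List (Int × Int)
  | 0, _, _, paired => paired
  | f + 1, left, right, paired =>
    if left.length > 0 ∧ right.length > 0 then
      match PySem.List.min? left (fun x => x), PySem.List.min? right (fun x => x) with
      | some ml, some mr =>
        match PySem.List.remove? left ml, PySem.List.remove? right mr with
        | some left', some right' => pvPairGo f left' right' (paired ++ [(ml, mr)])
        | _, _ => paired   -- unreachable: the minimum is a member of its list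
      | _, _ => paired     -- unreachable: both lists are nonempty here
    else paired

def pair_min_left_with_min_right (left : List Int) (right : List Int) : List (Int × Int) :=
  pvPairGo (min left.length right.length) left right []

-- ===== PORT B =====
def pair_min_left_with_min_right_alt (left : List Int) (right : List Int) : List (Int × Int) :=
  List.zip (PySem.List.sorted left (fun x => x) false) (PySem.List.sorted right (fun x => x) false)

-- ===== PRECONDITION & SPEC =====
def Spec_pair_min_left_with_min_right (left : List Int) (right : List Int) (out : List (Int × Int)) : Prop := out = pair_min_left_with_min_right_alt left right
instance (left : List Int) (right : List Int) (out : List (Int × Int)) : Decidable (Spec_pair_min_left_with_min_right left right out) := by unfold Spec_pair_min_left_with_min_right; infer_instance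

-- ===== CLAIM (what is proved, stated in full; the proofs are below) =====
def Claim_equal_pair_min_left_with_min_right : Prop := ∀ (left : List Int) (right : List Int), Dom_pair_min_left_with_min_right left right → Spec_pair_min_left_with_min_right left right (pair_min_left_with_min_right left right)

-- ===== LEMMAS AND PROOFS =====

-- the first minimum heads the sorted list: sorted l = m :: sorted (l.erase m)
theorem sorted_min_cons (l : List Int) (m : Int)
    (hm : PySem.List.min? l (fun x => x) = some m) :
    PySem.List.sorted l (fun x => x) false
      = m :: PySem.List.sorted (l.erase m) (fun x => x) false := by
  have hmem : m ∈ l := PySem.List.min?_mem hm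
  have hmin : ∀ y ∈ l, m ≤ y := by
    intro y hy
    simpa using PySem.List.min?_isMin hm y hy
  apply PySem.List.eq_of_perm_of_pairwise_le_of_injective (fun x => x)
    (fun a b h => h)
  · -- permutation: sorted l ~ m :: sorted (l.erase m)
    exact (PySem.List.sorted_perm l (fun x => x) false).trans
      ((List.perm_cons_erase hmem).trans
        (List.Perm.cons m (PySem.List.sorted_perm (l.erase m) (fun x => x) false).symm))
  · exact PySem.List.sorted_pairwise l (fun x => x)
  · refine List.Pairwise.cons ?_ (PySem.List.sorted_pairwise (l.erase m) (fun x => x))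
    intro y hy
    exact hmin y (l.erase_subset ((PySem.List.mem_sorted _ _ _ _).1 hy))

theorem pvPairGo_eq (f : Nat) : ∀ (l r : List Int) (acc : List (Int × Int)),
    f = min l.length r.length →
    pvPairGo f l r acc
      = acc ++ List.zip (PySem.List.sorted l (fun x => x) false)
                        (PySem.List.sorted r (fun x => x) false) := by
  induction f with
  | zero =>
    intro l r acc hf
    have : l.length = 0 ∨ r.length = 0 := by omega
    rcases this with h | h
    · have hl : l = [] := List.length_eq_zero_iff.mp h
      simp [pvPairGo, hl, PySem.List.sorted]
    · have hr : r = [] := List.length_eq_zero_iff.mp h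
      have : PySem.List.sorted r (fun x => x) false = [] :=
        (PySem.List.sorted_eq_nil_iff r (fun x => x) false).2 hr
      simp [pvPairGo, this]
  | succ f ih =>
    intro l r acc hf
    have hl : 0 < l.length := by omega
    have hr : 0 < r.length := by omega
    have hlne : l ≠ [] := by intro h; simp [h] at hl
    have hrne : r ≠ [] := by intro h; simp [h] at hr
    obtain ⟨ml, hml⟩ : ∃ m, PySem.List.min? l (fun x => x) = some m := by
      cases h : PySem.List.min? l (fun x => x) with
      | none => exact absurd ((PySem.List.min?_eq_none_iff _ _).1 h) hlne
      | some m => exact ⟨m, rfl⟩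
    obtain ⟨mr, hmr⟩ : ∃ m, PySem.List.min? r (fun x => x) = some m := by
      cases h : PySem.List.min? r (fun x => x) with
      | none => exact absurd ((PySem.List.min?_eq_none_iff _ _).1 h) hrne
      | some m => exact ⟨m, rfl⟩
    have hmeml : ml ∈ l := PySem.List.min?_mem hml
    have hmemr : mr ∈ r := PySem.List.min?_mem hmr
    have hreml : PySem.List.remove? l ml = some (l.erase ml) :=
      PySem.List.remove?_eq_some_erase l ml hmeml
    have hremr : PySem.List.remove? r mr = some (r.erase mr) :=
      PySem.List.remove?_eq_some_erase r mr hmemr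
    have hstep : pvPairGo (f + 1) l r acc
        = pvPairGo f (l.erase ml) (r.erase mr) (acc ++ [(ml, mr)]) := by
      simp [pvPairGo, hl, hr, hml, hmr, hreml, hremr]
    have hlen_l : (l.erase ml).length = l.length - 1 := List.length_erase_of_mem hmeml
    have hlen_r : (r.erase mr).length = r.length - 1 := List.length_erase_of_mem hmemr
    rw [hstep, ih _ _ _ (by omega)]
    rw [sorted_min_cons l ml hml, sorted_min_cons r mr hmr]
    simp [List.zip_cons_cons]

-- ===== VERDICT (by name: the statement is the Claim_ definition above) =====
theorem pair_min_left_with_min_right_spec : Claim_equal_pair_min_left_with_min_right := by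
  intro left right _
  unfold Spec_pair_min_left_with_min_right pair_min_left_with_min_right pair_min_left_with_min_right_alt
  simpa using pvPairGo_eq _ left right [] rfl
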